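-- pv_equiv track=rewrite | github.com/Jmathieu14/FractalMusicGenerator | utility.py | hex_to_base10_string
-- ===== SOURCE A (Python) =====
-- def hex_to_base10_string(hex):
--     idxs_to_replace = []
--     new_vals = []
--     ctr = 0
--     for c in hex:
--         new_val = -1
--         if (c == 'a'):
--             new_val = 10
--         elif (c == 'b'):
--             new_val = 11
--         elif (c == 'c'):
--             new_val = 12
--         elif (c == 'd'):
--             new_val = 13
--         elif (c == 'e'):
--             new_val = 14
--         elif (c == 'f'):
--             new_val = 15
--
--         if (new_val != -1):
--             new_vals.append(new_val)
--             idxs_to_replace.append(ctr)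
--
--         ctr = ctr + 1
--
--     ctr = 0
--     item_ct = idxs_to_replace.__len__()
--     new_full_str = ""
--     last_idx = 0
--
--     for ctr in range(item_ct):
--         new_str = str(new_vals[ctr])
--         new_full_str += hex[last_idx:idxs_to_replace[ctr]] + new_str
--         last_idx = idxs_to_replace[ctr] + 1
--
--     # Add last part of string
--     new_full_str += hex[last_idx:]
--
--     return new_full_str
-- ===== SOURCE B (Python) =====
-- _HEX_MAP = {'a': '10', 'b': '11', 'c': '12', 'd': '13', 'e': '14', 'f': '15'}
--
-- def hex_to_base10_string(hex):
--     return "".join(_HEX_MAP.get(c, c) for c in hex)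
-- ===== Notes on version B (the rewrite author's own statement) =====
-- stated objective: simpler
-- what changed: Replaces A's two-pass scheme (collect indices/values of hex letters, then rebuild the string via slices, index arithmetic and repeated concatenation) with a single pass emitting a fixed per-character mapping, joined once with str.join.
import Mathlib
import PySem

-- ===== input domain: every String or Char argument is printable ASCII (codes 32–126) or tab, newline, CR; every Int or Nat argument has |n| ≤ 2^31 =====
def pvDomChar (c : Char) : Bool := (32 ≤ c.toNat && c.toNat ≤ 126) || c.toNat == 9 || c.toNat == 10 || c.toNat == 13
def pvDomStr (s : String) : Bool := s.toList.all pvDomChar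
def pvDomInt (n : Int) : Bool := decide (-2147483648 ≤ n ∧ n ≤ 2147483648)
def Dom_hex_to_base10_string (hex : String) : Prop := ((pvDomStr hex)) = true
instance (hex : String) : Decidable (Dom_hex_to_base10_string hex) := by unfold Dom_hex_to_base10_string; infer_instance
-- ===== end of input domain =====

-- B replaces A's two-pass collect-indices-then-splice-slices scheme with a single pass
-- substituting each character through a fixed map (objective: simpler).

-- ===== PORT A =====
-- new_val for one character (A's if/elif chain)
def hexNewVal (c : Char) : Int :=
  if c = 'a' then 10
  else if c = 'b' then 11
  else if c = 'c' then 12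
  else if c = 'd' then 13
  else if c = 'e' then 14
  else if c = 'f' then 15
  else -1

def hex_to_base10_string (hex : String) : String :=
  let cs := hex.toList
  -- first loop: for c in hex, collecting idxs_to_replace, new_vals, ctr
  let st1 := cs.foldl (fun (st : List Int × List Int × Int) c =>
      let idxs := st.1
      let vals := st.2.1
      let ctr := st.2.2
      let new_val := hexNewVal c
      if new_val ≠ -1 then (idxs ++ [ctr], vals ++ [new_val], ctr + 1)
      else (idxs, vals, ctr + 1)) ([], [], 0)
  let idxs := st1.1
  let vals := st1.2.1
  let item_ct := PySem.List.len idxs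
  -- second loop: for ctr in range(item_ct)
  let st2 := (PySem.List.pyRange 0 item_ct 1).foldl (fun (st : List Char × Int) ctr =>
      let acc := st.1
      let last_idx := st.2
      let new_str := PySem.Int.toChars (PySem.List.pyGetD vals ctr 0)
      (acc ++ PySem.List.slice cs (some last_idx) (some (PySem.List.pyGetD idxs ctr 0)) ++ new_str,
       PySem.List.pyGetD idxs ctr 0 + 1)) ([], 0)
  -- add last part of string
  String.ofList (st2.1 ++ PySem.List.slice cs (some st2.2) none)

-- ===== PORT B =====
-- the fixed mapping _HEX_MAP.get(c, c), as a character-to-chars substitution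
def hexMapC (c : Char) : List Char :=
  if c = 'a' then ['1', '0']
  else if c = 'b' then ['1', '1']
  else if c = 'c' then ['1', '2']
  else if c = 'd' then ['1', '3']
  else if c = 'e' then ['1', '4']
  else if c = 'f' then ['1', '5']
  else [c]

def hex_to_base10_string_alt (hex : String) : String :=
  String.ofList (hex.toList.flatMap hexMapC)

-- ===== PRECONDITION & SPEC =====
def Spec_hex_to_base10_string (hex : String) (out : String) : Prop := out = hex_to_base10_string_alt hex
instance (hex : String) (out : String) : Decidable (Spec_hex_to_base10_string hex out) := by unfold Spec_hex_to_base10_string; infer_instance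

-- ===== CLAIM (what is proved, stated in full; the proofs are below) =====
def Claim_equal_hex_to_base10_string : Prop := ∀ (hex : String), Dom_hex_to_base10_string hex → Spec_hex_to_base10_string hex (hex_to_base10_string hex)

-- ===== LEMMAS AND PROOFS =====

-- (index, value) pairs A's first loop collects, starting at position k
def hexCollect : List Char → Nat → List (Int × Int)
  | [], _ => []
  | c :: t, k =>
      if hexNewVal c ≠ -1 then ((k : Int), hexNewVal c) :: hexCollect t (k + 1)
      else hexCollect t (k + 1)

-- recursive reading of A's second loop: splice slices of `full` around the replacements
def hexRender (full : List Char) : List (Int × Int) → Int → List Char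
  | [], last => PySem.List.slice full (some last) none
  | (i, v) :: rest, last =>
      PySem.List.slice full (some last) (some i) ++ PySem.Int.toChars v ++ hexRender full rest (i + 1)

theorem hexCollect_fst (l : List Char) (k : Nat) :
    ∀ p ∈ hexCollect l k, ∃ m : Nat, k ≤ m ∧ p.1 = (m : Int) := by
  induction l generalizing k with
  | nil => simp [hexCollect]
  | cons c t ih =>
      intro p hp
      simp only [hexCollect] at hp
      by_cases hv : hexNewVal c ≠ -1
      · rw [if_pos hv] at hp
        rcases List.mem_cons.mp hp with hp | hp
        · exact ⟨k, le_refl _, by simp [hp]⟩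
        · obtain ⟨m, hm, he⟩ := ih (k + 1) p hp
          exact ⟨m, by omega, he⟩
      · rw [if_neg hv] at hp
        obtain ⟨m, hm, he⟩ := ih (k + 1) p hp
        exact ⟨m, by omega, he⟩

theorem hexFold1 (l : List Char) (I V : List Int) (k : Nat) :
    l.foldl (fun (st : List Int × List Int × Int) c =>
      let idxs := st.1
      let vals := st.2.1
      let ctr := st.2.2
      let new_val := hexNewVal c
      if new_val ≠ -1 then (idxs ++ [ctr], vals ++ [new_val], ctr + 1)
      else (idxs, vals, ctr + 1)) (I, V, (k : Int))
    = (I ++ (hexCollect l k).map Prod.fst, V ++ (hexCollect l k).map Prod.snd,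
       ((k + l.length : Nat) : Int)) := by
  induction l generalizing I V k with
  | nil => simp [hexCollect]
  | cons c t ih =>
      simp only [List.foldl_cons, hexCollect]
      by_cases h : hexNewVal c = -1
      · simp only [h]
        have : ((k : Int) + 1) = ((k + 1 : Nat) : Int) := by push_cast; ring
        rw [if_neg (by simp), this, ih]
        simp [Prod.ext_iff]
        omega
      · simp only [if_pos h]
        have : ((k : Int) + 1) = ((k + 1 : Nat) : Int) := by push_cast; ring
        rw [this, ih]
        simp [Prod.ext_iff]
        omega

-- peel one unreplaced character off the front of a render
theorem hexRender_cons (full : List Char) (zs : List (Int × Int)) (k : Nat)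
    (hk : k < full.length)
    (hz : ∀ p ∈ zs, ∃ m : Nat, k + 1 ≤ m ∧ p.1 = (m : Int)) :
    hexRender full zs (k : Int) = full[k] :: hexRender full zs ((k + 1 : Nat) : Int) := by
  cases zs with
  | nil =>
      simp only [hexRender]
      rw [PySem.List.slice_from_natCast, PySem.List.slice_from_natCast]
      rw [List.drop_eq_getElem_cons hk]
  | cons p rest =>
      obtain ⟨m, hm, he⟩ := hz p (by simp)
      obtain ⟨i, v⟩ := p
      simp only at he
      subst he
      simp only [hexRender]
      rw [PySem.List.slice_natCast, PySem.List.slice_natCast]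
      rw [List.drop_eq_getElem_cons hk]
      have h1 : (m - k) = (m - (k + 1)) + 1 := by omega
      rw [h1, List.take_succ_cons]
      simp

theorem hexMain (full : List Char) (l : List Char) (k : Nat) (h : full.drop k = l) :
    hexRender full (hexCollect l k) (k : Int) = l.flatMap hexMapC := by
  induction l generalizing k with
  | nil =>
      simp only [hexCollect, hexRender, List.flatMap_nil]
      rw [PySem.List.slice_from_natCast, h]
  | cons c t ih =>
      have hk : k < full.length := by
        by_contra hc
        rw [List.drop_eq_nil_of_le (by omega)] at h
        exact List.cons_ne_nil c t h.symm
      have hsplit := List.drop_eq_getElem_cons hk (l := full)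
      rw [h] at hsplit
      have hck : full[k] = c := ((List.cons.injEq _ _ _ _).mp hsplit).1.symm
      have ht : full.drop (k + 1) = t := ((List.cons.injEq _ _ _ _).mp hsplit).2.symm
      simp only [hexCollect]
      by_cases hv : hexNewVal c = -1
      · rw [if_neg (by simp [hv])]
        rw [hexRender_cons full _ k hk (hexCollect_fst t (k + 1)), ih (k + 1) ht, hck]
        have hmc : hexMapC c = [c] := by
          unfold hexNewVal at hv
          unfold hexMapC
          split_ifs at hv ⊢ <;> simp_all
        simp [hmc]
      · rw [if_pos hv]
        simp only [hexRender]
        rw [PySem.List.slice_natCast]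
        have : ((k : Int) + 1) = ((k + 1 : Nat) : Int) := by push_cast; ring
        rw [this, ih (k + 1) ht]
        have hmc : PySem.Int.toChars (hexNewVal c) = hexMapC c := by
          unfold hexNewVal at hv ⊢
          unfold hexMapC
          split_ifs at hv ⊢ <;> first | rfl | simp_all
        simp [hmc]

-- A's second loop (as a structural fold over the pairs), with the trailing slice appended
theorem hexFold2 (full : List Char) (zs : List (Int × Int)) (acc : List Char) (last : Int) :
    (zs.foldl (fun (st : List Char × Int) (p : Int × Int) =>
        (st.1 ++ PySem.List.slice full (some st.2) (some p.1) ++ PySem.Int.toChars p.2,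
         p.1 + 1)) (acc, last)).1
      ++ PySem.List.slice full
          (some ((zs.foldl (fun (st : List Char × Int) (p : Int × Int) =>
              (st.1 ++ PySem.List.slice full (some st.2) (some p.1) ++ PySem.Int.toChars p.2,
               p.1 + 1)) (acc, last)).2)) none
    = acc ++ hexRender full zs last := by
  induction zs generalizing acc last with
  | nil => simp [hexRender]
  | cons p rest ih =>
      obtain ⟨i, v⟩ := p
      simp only [List.foldl_cons, hexRender]
      rw [ih]
      simp

-- ===== VERDICT (by name: the statement is the Claim_ definition above) =====
theorem hex_to_base10_string_spec : Claim_equal_hex_to_base10_string := by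
  intro hex _
  unfold Spec_hex_to_base10_string hex_to_base10_string hex_to_base10_string_alt
  simp only []
  set cs := hex.toList with hcs
  set zs := hexCollect cs 0 with hzs
  have h1 := hexFold1 cs [] [] 0
  simp only [Nat.cast_zero, List.nil_append, Nat.zero_add] at h1
  rw [h1, ← hzs]
  -- turn the index loop over pyRange into a structural fold over zs
  have hlen : PySem.List.len (zs.map Prod.fst) = ((zs.length : Nat) : Int) := by
    simp [PySem.List.len_eq]
  have hbody : (PySem.List.pyRange 0 (PySem.List.len (zs.map Prod.fst)) 1).foldl
      (fun (st : List Char × Int) ctr =>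
        (st.1 ++ PySem.List.slice cs (some st.2)
            (some (PySem.List.pyGetD (zs.map Prod.fst) ctr 0))
          ++ PySem.Int.toChars (PySem.List.pyGetD (zs.map Prod.snd) ctr 0),
         PySem.List.pyGetD (zs.map Prod.fst) ctr 0 + 1)) ([], 0)
      = zs.foldl (fun (st : List Char × Int) (p : Int × Int) =>
        (st.1 ++ PySem.List.slice cs (some st.2) (some p.1) ++ PySem.Int.toChars p.2,
         p.1 + 1)) ([], 0) := by
    rw [hlen]
    have := PySem.List.foldl_pyRange_zero_pyGetD (xs := zs) (d := (0, 0))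
      (f := fun (st : List Char × Int) (p : Int × Int) =>
        (st.1 ++ PySem.List.slice cs (some st.2) (some p.1) ++ PySem.Int.toChars p.2,
         p.1 + 1)) (init := ([], 0))
    rw [PySem.List.len_eq] at this
    rw [← this]
    apply PySem.List.foldl_congr_mem
    intro st j hj
    rw [PySem.List.mem_pyRange_one] at hj
    have hj2 : j < (zs.length : Int) := by
      have := hj.2; omega
    have hfst : PySem.List.pyGetD (zs.map Prod.fst) j 0 = (PySem.List.pyGetD zs j (0, 0)).1 := by
      rw [PySem.List.pyGetD_eq_getElem (zs.map Prod.fst) 0 hj.1 (by simp; omega),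
          PySem.List.pyGetD_eq_getElem zs (0, 0) hj.1 (by omega)]
      simp
    have hsnd : PySem.List.pyGetD (zs.map Prod.snd) j 0 = (PySem.List.pyGetD zs j (0, 0)).2 := by
      rw [PySem.List.pyGetD_eq_getElem (zs.map Prod.snd) 0 hj.1 (by simp; omega),
          PySem.List.pyGetD_eq_getElem zs (0, 0) hj.1 (by omega)]
      simp
    rw [hfst, hsnd]
  simp only [hbody]
  have h2 := hexFold2 cs zs [] 0
  simp only [List.nil_append] at h2
  rw [h2]
  have h3 := hexMain cs cs 0 (by simp)
  simp only [Nat.cast_zero] at h3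
  rw [h3]
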